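-- pv_equiv track=rewrite | github.com/elp2/advent_of_code | 2018/20.part1.py | solve
-- ===== SOURCE A (Python) =====
-- def parse_lines(lines):
--     return lines[0].strip()
--
-- def move(c, fastest, pos, depth):
--     x, y = pos
--     if c == "N":
--         pos = (x, y+1)
--     elif c == "S":
--         pos = (x, y-1)
--     elif c == "E":
--         pos = (x+1, y)
--     elif c == "W":
--         pos = (x - 1, y)
--     else:
--         assert False
--     if pos in fastest:
--         comp = fastest[pos]
--         if depth < comp:
--             fastest[pos] = depth
--     else:
--         fastest[pos] = depth
--     return pos
--
-- def solve(lines):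
--     parsed = parse_lines(lines)
--
--     fastest = {}
--     pos = (0, 0)
--     depth = 0
--     stack = []
--     fastest[pos] = depth
--     for c in parsed:
--         if c in "NSEW":
--             depth += 1
--             pos = move(c, fastest, pos, depth)
--         elif c == "(":
--             stack.append((pos, depth))
--         elif c == "|":
--             pos, depth = stack[-1]
--         elif c == ")":
--             stack.pop()
--     return max(fastest.values())
-- ===== SOURCE B (Python) =====
-- DELTA = {"N": (0, 1), "S": (0, -1), "E": (1, 0), "W": (-1, 0)}
--
-- def solve(lines):
--     s = lines[0].strip()
--     fastest = {(0, 0): 0}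
--
--     def walk(i, save, pos, depth):
--         # scans from index i; returns (pos, depth, i) at ')' or end of string
--         while i < len(s):
--             c = s[i]
--             i += 1
--             if c in DELTA:
--                 dx, dy = DELTA[c]
--                 pos = (pos[0] + dx, pos[1] + dy)
--                 depth += 1
--                 fastest[pos] = min(depth, fastest.get(pos, depth))
--             elif c == "(":
--                 pos, depth, i = walk(i, (pos, depth), pos, depth)
--             elif c == "|":
--                 pos, depth = save
--             elif c == ")":
--                 return pos, depth, i
--         return pos, depth, i
--
--     walk(0, None, (0, 0), 0)
--     return max(fastest.values())
-- ===== Notes on version B (the rewrite author's own statement) =====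
-- stated objective: alternative
-- what changed: A's single pass with an explicit stack of saved (pos, depth) states is replaced by a recursive-descent parser over the regex: groups are handled by a recursive walk that saves the group-start state in its own call frame and returns the last alternative's (pos, depth) and resume index, while the same shared fastest-distance dict is updated with a running min per position.
import Mathlib
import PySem

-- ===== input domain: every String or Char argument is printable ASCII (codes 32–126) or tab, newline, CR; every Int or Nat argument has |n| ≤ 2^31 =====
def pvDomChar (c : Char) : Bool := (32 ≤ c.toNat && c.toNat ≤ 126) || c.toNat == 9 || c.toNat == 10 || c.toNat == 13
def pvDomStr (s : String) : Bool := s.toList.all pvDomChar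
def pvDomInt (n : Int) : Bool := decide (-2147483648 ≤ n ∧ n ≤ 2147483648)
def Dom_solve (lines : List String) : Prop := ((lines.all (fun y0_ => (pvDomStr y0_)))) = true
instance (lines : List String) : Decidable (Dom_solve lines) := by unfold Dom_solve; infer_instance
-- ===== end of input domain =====

-- B replaces A's explicit stack machine by a recursive-descent parser over the regex
-- (objective: alternative decomposition, same cost); return value only, no mutation of `lines`.

abbrev PVFast := PySem.Dict (Int × Int) Int
abbrev PVStA := PVFast × (Int × Int) × Int × List ((Int × Int) × Int)

-- ===== PORT A =====
def moveA (c : Char) (fastest : PVFast) (pos : Int × Int) (depth : Int) : PVFast × (Int × Int) :=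
  let p :=
    if c = 'N' then (pos.1, pos.2 + 1)
    else if c = 'S' then (pos.1, pos.2 - 1)
    else if c = 'E' then (pos.1 + 1, pos.2)
    else if c = 'W' then (pos.1 - 1, pos.2)
    else pos  -- Python's `assert False`: unreachable, moveA is only called with c in "NSEW"
  if fastest.contains p then
    match fastest.get? p with
    | some comp => if depth < comp then (fastest.insert p depth, p) else (fastest, p)
    | none => (fastest, p)
  else (fastest.insert p depth, p)

def stepA (st : PVStA) (c : Char) : PVStA :=
  let (fastest, pos, depth, stack) := st
  if c = 'N' ∨ c = 'S' ∨ c = 'E' ∨ c = 'W' then   -- c in "NSEW"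
    let depth' := depth + 1
    let m := moveA c fastest pos depth'
    (m.1, m.2, depth', stack)
  else if c = '(' then (fastest, pos, depth, (pos, depth) :: stack)
  else if c = '|' then
    match stack with
    | top :: _ => (fastest, top.1, top.2, stack)   -- stack[-1]
    | [] => (fastest, pos, depth, stack)           -- Python raises IndexError: outside Pre_
  else if c = ')' then (fastest, pos, depth, stack.tail)   -- stack.pop(); empty raises: outside Pre_
  else (fastest, pos, depth, stack)

def solve (lines : List String) : Int :=
  let parsed := PySem.Str.strip ((PySem.List.pyGet? lines 0).getD "")   -- lines[0] raises on []: outside Pre_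
  let st := parsed.toList.foldl stepA
    ((PySem.Dict.empty.insert ((0 : Int), (0 : Int)) (0 : Int)), ((0 : Int), (0 : Int)), (0 : Int), [])
  match PySem.List.max? st.1.values (fun v => v) with
  | some v => v
  | none => 0   -- unreachable: fastest always contains (0,0)

-- ===== PORT B =====
structure PVWRes where
  fast : PVFast
  pos : Int × Int
  dep : Int
  rest : List Char
deriving Repr

def deltaB (c : Char) : Option (Int × Int) :=
  if c = 'N' then some (0, 1)
  else if c = 'S' then some (0, -1)
  else if c = 'E' then some (1, 0)
  else if c = 'W' then some (-1, 0)
  else none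

def noteB (fastest : PVFast) (p : Int × Int) (depth : Int) : PVFast :=
  fastest.insert p (min depth (fastest.getD p depth))

-- recursive-descent walk; the Nat is fuel only (|s| always suffices, Source B recurses without it)
def walkB : Nat → List Char → PVFast → Option ((Int × Int) × Int) → (Int × Int) → Int → PVWRes
  | 0, _, f, _, p, d => ⟨f, p, d, []⟩
  | _ + 1, [], f, _, p, d => ⟨f, p, d, []⟩
  | k + 1, c :: cs, f, save, p, d =>
    match deltaB c with
    | some (dx, dy) =>
      let p' := (p.1 + dx, p.2 + dy)
      walkB k cs (noteB f p' (d + 1)) save p' (d + 1)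
    | none =>
      if c = '(' then
        let r := walkB k cs f (some (p, d)) p d
        walkB k r.rest r.fast save r.pos r.dep
      else if c = '|' then
        match save with
        | some s => walkB k cs f save s.1 s.2
        | none => ⟨f, p, d, cs⟩   -- Python B raises here (top-level '|'): outside Pre_
      else if c = ')' then ⟨f, p, d, cs⟩
      else walkB k cs f save p d

def solve_alt (lines : List String) : Int :=
  let s := PySem.Str.strip ((PySem.List.pyGet? lines 0).getD "")
  let cs := s.toList
  let r := walkB cs.length cs (PySem.Dict.empty.insert ((0 : Int), (0 : Int)) (0 : Int)) none (0, 0) 0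
  match PySem.List.max? r.fast.values (fun v => v) with
  | some v => v
  | none => 0

-- ===== PRECONDITION & SPEC =====
-- Pre_ excludes exactly the inputs on which A raises: an empty `lines` (IndexError on lines[0])
-- and first lines whose stripped text reaches a '|' or ')' with the '(' stack empty (IndexError).
def Pre_solve (lines : List String) : Prop :=
  lines ≠ [] ∧
  (∀ i < (PySem.Str.strip lines.headI).toList.length,
    ((PySem.Str.strip lines.headI).toList.getD i ' ' = '|' ∨
     (PySem.Str.strip lines.headI).toList.getD i ' ' = ')') →
    ((PySem.Str.strip lines.headI).toList.take i).count ')' <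
    ((PySem.Str.strip lines.headI).toList.take i).count '(')

instance (lines : List String) : Decidable (Pre_solve lines) := by unfold Pre_solve; infer_instance

def pvWitness_solve : List String := ["^N(E|W)SS$"]

def Spec_solve (lines : List String) (out : Int) : Prop := out = solve_alt lines
instance (lines : List String) (out : Int) : Decidable (Spec_solve lines out) := by unfold Spec_solve; infer_instance

-- ===== CLAIM (what is proved, stated in full; the proofs are below) =====
def Claim_equal_solve : Prop := ∀ (lines : List String), Dom_solve lines → Pre_solve lines → Spec_solve lines (solve lines)

-- ===== LEMMAS AND PROOFS =====

def projA (s : PVStA) : PVFast × (Int × Int) × Int := (s.1, s.2.1, s.2.2.1)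

-- balance predicate used only by the proofs
def balB : List Char → Nat → Bool
  | [], _ => true
  | c :: cs, n =>
    if c = '(' then balB cs (n + 1)
    else if c = ')' then decide (0 < n) && balB cs (n - 1)
    else if c = '|' then decide (0 < n) && balB cs n
    else balB cs n

lemma walkB_nodup : ∀ (k : Nat) (cs : List Char) (f : PVFast) sv p d,
    f.keys.Nodup → (walkB k cs f sv p d).fast.keys.Nodup := by
  intro k
  induction k with
  | zero => intro cs f sv p d h; simpa [walkB] using h
  | succ k ih =>
    intro cs f sv p d h
    cases cs with
    | nil => simpa [walkB] using h
    | cons c cs =>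
      simp only [walkB]
      cases hd : deltaB c with
      | some v =>
        obtain ⟨dx, dy⟩ := v
        exact ih _ _ _ _ _ (PySem.Dict.nodup_keys_insert _ _ _ h)
      | none =>
        split_ifs with h1 h2 h3
        · exact ih _ _ _ _ _ (ih _ _ _ _ _ h)
        · cases sv with
          | some s => exact ih _ _ _ _ _ h
          | none => simpa using h
        · simpa using h
        · exact ih _ _ _ _ _ h

lemma walkB_rest_len : ∀ (k : Nat) (cs : List Char) (f : PVFast) sv p d,
    (walkB k cs f sv p d).rest.length ≤ cs.length := by
  intro k
  induction k with
  | zero => intro cs f sv p d; simp [walkB]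
  | succ k ih =>
    intro cs f sv p d
    cases cs with
    | nil => simp [walkB]
    | cons c cs =>
      simp only [walkB]
      cases hd : deltaB c with
      | some v =>
        obtain ⟨dx, dy⟩ := v
        simp only [List.length_cons]
        exact le_trans (ih _ _ _ _ _) (Nat.le_succ _)
      | none =>
        split_ifs with h1 h2 h3
        · have h4 := ih ((walkB k cs f (some (p, d)) p d).rest)
            (walkB k cs f (some (p, d)) p d).fast sv (walkB k cs f (some (p, d)) p d).pos
            (walkB k cs f (some (p, d)) p d).dep
          have h5 := ih cs f (some (p, d)) p d
          simp only [List.length_cons]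
          omega
        · cases sv with
          | some s =>
            simp only [List.length_cons]
            exact le_trans (ih _ _ _ _ _) (Nat.le_succ _)
          | none => simp
        · simp
        · simp only [List.length_cons]
          exact le_trans (ih _ _ _ _ _) (Nat.le_succ _)

lemma deltaB_some_ne (c : Char) (dx dy : Int) (h : deltaB c = some (dx, dy)) :
    c ≠ '(' ∧ c ≠ ')' ∧ c ≠ '|' := by
  unfold deltaB at h
  split_ifs at h with h1 h2 h3 h4 <;> simp_all

lemma walkB_bal : ∀ (k : Nat) (cs : List Char) (n : Nat) (f : PVFast) s p d,
    balB cs (n + 1) = true → balB (walkB k cs f (some s) p d).rest n = true := by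
  intro k
  induction k with
  | zero => intro cs n f s p d _; simp [walkB, balB]
  | succ k ih =>
    intro cs n f s p d hb
    cases cs with
    | nil => simp [walkB, balB]
    | cons c cs =>
      simp only [walkB]
      cases hd : deltaB c with
      | some v =>
        obtain ⟨dx, dy⟩ := v
        obtain ⟨n1, n2, n3⟩ := deltaB_some_ne c dx dy hd
        simp only [balB, if_neg n1, if_neg n2, if_neg n3] at hb
        exact ih _ _ _ _ _ _ hb
      | none =>
        split_ifs with h1 h2 h3
        · subst h1
          simp [balB] at hb
          exact ih _ _ _ _ _ _ (ih _ _ _ _ _ _ hb)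
        · subst h2
          simp [balB] at hb
          exact ih _ _ _ _ _ _ hb
        · subst h3
          simp [balB] at hb
          simpa using hb
        · simp only [balB, if_neg h1, if_neg h3, if_neg h2] at hb
          exact ih _ _ _ _ _ _ hb

lemma dict_insert_get?_self (d : PVFast) (k : Int × Int) (v : Int)
    (hnd : d.keys.Nodup) (h : d.get? k = some v) : d.insert k v = d := by
  apply PySem.Dict.ext
  have hc : d.contains k = true := by
    rw [PySem.Dict.contains_eq_isSome_get?, h]; rfl
  rw [PySem.Dict.items_insert_of_contains _ _ hc]
  conv_rhs => rw [← List.map_id d.items]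
  apply List.map_congr_left
  rintro ⟨a, b⟩ hp
  by_cases hk : a = k
  · subst hk
    have hv : d.get? a = some b := PySem.Dict.get?_of_mem_items _ hp hnd
    rw [h] at hv
    simp only [beq_self_eq_true, if_true]
    exact congrArg (fun x => (a, x)) (Option.some_inj.mp hv)
  · simp [hk]

lemma moveA_eq_noteB (c : Char) (dx dy : Int) (h : deltaB c = some (dx, dy))
    (f : PVFast) (hnd : f.keys.Nodup) (p : Int × Int) (d : Int) :
    moveA c f p d = (noteB f (p.1 + dx, p.2 + dy) d, (p.1 + dx, p.2 + dy)) := by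
  have key : ∀ q : Int × Int,
      (if f.contains q then
        (match f.get? q with
          | some comp => if d < comp then (f.insert q d, q) else (f, q)
          | none => (f, q))
       else (f.insert q d, q)) = (noteB f q d, q) := by
    intro q
    by_cases hc : f.contains q
    · cases hg : f.get? q with
      | none => rw [PySem.Dict.contains_eq_isSome_get?, hg] at hc; simp at hc
      | some comp =>
        have hgd : f.getD q d = comp := by
          rw [PySem.Dict.getD_eq_get?_getD, hg]; rfl
        simp only [hc, if_true]
        by_cases hlt : d < comp
        · simp [hlt, noteB, hgd, min_eq_left (le_of_lt hlt)]
        · simp [hlt, noteB, hgd, min_eq_right (not_lt.mp hlt),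
            dict_insert_get?_self f q comp hnd hg]
    · have hgd : f.getD q d = d := by
        rw [PySem.Dict.getD_eq_get?_getD]
        rw [PySem.Dict.contains_eq_isSome_get?] at hc
        cases hg : f.get? q with
        | none => rfl
        | some w => rw [hg] at hc; simp at hc
      simp [hc, noteB, hgd]
  unfold deltaB at h
  split_ifs at h with h1 h2 h3 h4 <;> cases h
  · subst h1; simpa [moveA] using key (p.1, p.2 + 1)
  · subst h2; simpa [moveA, sub_eq_add_neg] using key (p.1, p.2 - 1)
  · subst h3; simpa [moveA, h1] using key (p.1 + 1, p.2)
  · subst h4; simpa [moveA, h1, h2, h3, sub_eq_add_neg] using key (p.1 - 1, p.2)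

lemma deltaB_some_char (c : Char) (dx dy : Int) (h : deltaB c = some (dx, dy)) :
    c = 'N' ∨ c = 'S' ∨ c = 'E' ∨ c = 'W' := by
  unfold deltaB at h; split_ifs at h <;> tauto

lemma deltaB_none_char (c : Char) (h : deltaB c = none) :
    ¬(c = 'N' ∨ c = 'S' ∨ c = 'E' ∨ c = 'W') := by
  unfold deltaB at h; split_ifs at h <;> simp_all

lemma loop_walk : ∀ (k : Nat) (cs : List Char), cs.length ≤ k →
    ∀ (f : PVFast) (sv : (Int × Int) × Int) (p : Int × Int) (d : Int) (st : List ((Int × Int) × Int)),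
    f.keys.Nodup →
    projA (cs.foldl stepA (f, p, d, sv :: st)) =
      projA ((walkB k cs f (some sv) p d).rest.foldl stepA
        ((walkB k cs f (some sv) p d).fast, (walkB k cs f (some sv) p d).pos,
         (walkB k cs f (some sv) p d).dep, st)) := by
  intro k
  induction k with
  | zero =>
    intro cs hlen f sv p d st hnd
    have : cs = [] := List.length_eq_zero_iff.mp (Nat.le_zero.mp hlen)
    subst this
    simp [walkB, projA]
  | succ k ih =>
    intro cs hlen f sv p d st hnd
    cases cs with
    | nil => simp [walkB, projA]
    | cons c cs =>
      have hlen' : cs.length ≤ k := by simp only [List.length_cons] at hlen; omega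
      simp only [List.foldl_cons]
      cases hd : deltaB c with
      | some v =>
        obtain ⟨dx, dy⟩ := v
        have hcs := deltaB_some_char c dx dy hd
        have hstep : stepA (f, p, d, sv :: st) c =
            (noteB f (p.1 + dx, p.2 + dy) (d + 1), (p.1 + dx, p.2 + dy), d + 1, sv :: st) := by
          simp only [stepA, if_pos hcs, moveA_eq_noteB c dx dy hd f hnd p (d + 1)]
        have hwalk : walkB (k + 1) (c :: cs) f (some sv) p d =
            walkB k cs (noteB f (p.1 + dx, p.2 + dy) (d + 1)) (some sv) (p.1 + dx, p.2 + dy) (d + 1) := by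
          simp [walkB, hd]
        rw [hstep, hwalk]
        exact ih cs hlen' _ sv _ _ st (PySem.Dict.nodup_keys_insert _ _ _ hnd)
      | none =>
        have hcs := deltaB_none_char c hd
        by_cases h1 : c = '('
        · subst h1
          have hstep : stepA (f, p, d, sv :: st) '(' = (f, p, d, (p, d) :: sv :: st) := by
            simp [stepA]
          have hwalk : walkB (k + 1) ('(' :: cs) f (some sv) p d =
              walkB k (walkB k cs f (some (p, d)) p d).rest (walkB k cs f (some (p, d)) p d).fast
                (some sv) (walkB k cs f (some (p, d)) p d).pos (walkB k cs f (some (p, d)) p d).dep := by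
            simp [walkB, deltaB]
          rw [hstep, hwalk]
          rw [ih cs hlen' f (p, d) p d (sv :: st) hnd]
          exact ih _ (le_trans (walkB_rest_len k cs f (some (p, d)) p d) hlen') _ sv _ _ st
            (walkB_nodup k cs f (some (p, d)) p d hnd)
        · by_cases h2 : c = '|'
          · subst h2
            have hstep : stepA (f, p, d, sv :: st) '|' = (f, sv.1, sv.2, sv :: st) := by
              simp [stepA]
            have hwalk : walkB (k + 1) ('|' :: cs) f (some sv) p d =
                walkB k cs f (some sv) sv.1 sv.2 := by
              simp [walkB, deltaB]
            rw [hstep, hwalk]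
            exact ih cs hlen' f sv sv.1 sv.2 st hnd
          · by_cases h3 : c = ')'
            · subst h3
              have hstep : stepA (f, p, d, sv :: st) ')' = (f, p, d, st) := by
                simp [stepA]
              have hwalk : walkB (k + 1) (')' :: cs) f (some sv) p d = ⟨f, p, d, cs⟩ := by
                simp [walkB, deltaB]
              rw [hstep, hwalk]
            · have hstep : stepA (f, p, d, sv :: st) c = (f, p, d, sv :: st) := by
                simp [stepA, hcs, h1, h2, h3]
              have hwalk : walkB (k + 1) (c :: cs) f (some sv) p d =
                  walkB k cs f (some sv) p d := by
                simp [walkB, hd, h1, h2, h3]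
              rw [hstep, hwalk]
              exact ih cs hlen' f sv p d st hnd

lemma top_walk : ∀ (k : Nat) (cs : List Char), cs.length ≤ k → balB cs 0 = true →
    ∀ (f : PVFast) (p : Int × Int) (d : Int), f.keys.Nodup →
    projA (cs.foldl stepA (f, p, d, [])) =
      ((walkB k cs f none p d).fast, (walkB k cs f none p d).pos, (walkB k cs f none p d).dep) := by
  intro k
  induction k with
  | zero =>
    intro cs hlen _ f p d hnd
    have : cs = [] := List.length_eq_zero_iff.mp (Nat.le_zero.mp hlen)
    subst this
    simp [walkB, projA]
  | succ k ih =>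
    intro cs hlen hbal f p d hnd
    cases cs with
    | nil => simp [walkB, projA]
    | cons c cs =>
      have hlen' : cs.length ≤ k := by simp only [List.length_cons] at hlen; omega
      simp only [List.foldl_cons]
      cases hd : deltaB c with
      | some v =>
        obtain ⟨dx, dy⟩ := v
        have hcs := deltaB_some_char c dx dy hd
        obtain ⟨n1, n2, n3⟩ := deltaB_some_ne c dx dy hd
        have hbal' : balB cs 0 = true := by
          simp only [balB, if_neg n1, if_neg n2, if_neg n3] at hbal
          exact hbal
        have hstep : stepA (f, p, d, []) c =
            (noteB f (p.1 + dx, p.2 + dy) (d + 1), (p.1 + dx, p.2 + dy), d + 1, []) := by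
          simp only [stepA, if_pos hcs, moveA_eq_noteB c dx dy hd f hnd p (d + 1)]
        have hwalk : walkB (k + 1) (c :: cs) f none p d =
            walkB k cs (noteB f (p.1 + dx, p.2 + dy) (d + 1)) none (p.1 + dx, p.2 + dy) (d + 1) := by
          simp [walkB, hd]
        rw [hstep, hwalk]
        exact ih cs hlen' hbal' _ _ _ (PySem.Dict.nodup_keys_insert _ _ _ hnd)
      | none =>
        have hcs := deltaB_none_char c hd
        by_cases h1 : c = '('
        · subst h1
          have hbal' : balB cs 1 = true := by simpa [balB] using hbal
          have hstep : stepA (f, p, d, []) '(' = (f, p, d, [(p, d)]) := by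
            simp [stepA]
          have hwalk : walkB (k + 1) ('(' :: cs) f none p d =
              walkB k (walkB k cs f (some (p, d)) p d).rest (walkB k cs f (some (p, d)) p d).fast
                none (walkB k cs f (some (p, d)) p d).pos (walkB k cs f (some (p, d)) p d).dep := by
            simp [walkB, deltaB]
          rw [hstep, hwalk]
          rw [loop_walk k cs hlen' f (p, d) p d [] hnd]
          exact ih _ (le_trans (walkB_rest_len k cs f (some (p, d)) p d) hlen')
            (walkB_bal k cs 0 f (p, d) p d hbal')
            _ _ _ (walkB_nodup k cs f (some (p, d)) p d hnd)
        · by_cases h2 : c = '|'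
          · subst h2; simp [balB] at hbal
          · by_cases h3 : c = ')'
            · subst h3; simp [balB] at hbal
            · have hbal' : balB cs 0 = true := by
                simp only [balB, if_neg h1, if_neg h3, if_neg h2] at hbal
                exact hbal
              have hstep : stepA (f, p, d, []) c = (f, p, d, []) := by
                simp [stepA, hcs, h1, h2, h3]
              have hwalk : walkB (k + 1) (c :: cs) f none p d = walkB k cs f none p d := by
                simp [walkB, hd, h1, h2, h3]
              rw [hstep, hwalk]
              exact ih cs hlen' hbal' f p d hnd

lemma count_balB : ∀ (cs : List Char) (k : Nat),
    (∀ i < cs.length, (cs.getD i ' ' = '|' ∨ cs.getD i ' ' = ')') →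
      (cs.take i).count ')' < k + (cs.take i).count '(') →
    balB cs k = true := by
  intro cs
  induction cs with
  | nil => intro k _; rfl
  | cons c cs ih =>
    intro k h
    have hshift : ∀ i, i < cs.length → (cs.getD i ' ' = '|' ∨ cs.getD i ' ' = ')') →
        (cs.take i).count ')' + (if c = ')' then 1 else 0) <
          k + ((cs.take i).count '(' + (if c = '(' then 1 else 0)) := by
      intro i hi hc
      have := h (i + 1) (by simpa using hi) (by simpa using hc)
      simpa [List.take_succ_cons, List.count_cons] using this
    simp only [balB]
    split_ifs with h1 h2 h3
    · apply ih
      intro i hi hc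
      have := hshift i hi hc
      simp [h1] at this ⊢
      omega
    · have h0 : 0 < k := by
        have := h 0 (by simp) (by simp [h2])
        simpa using this
      have hb : balB cs (k - 1) = true := by
        apply ih
        intro i hi hc
        have := hshift i hi hc
        simp [h2] at this ⊢
        omega
      simp [h0, hb]
    · have h0 : 0 < k := by
        have := h 0 (by simp) (by simp [h3])
        simpa using this
      have hb : balB cs k = true := by
        apply ih
        intro i hi hc
        have := hshift i hi hc
        simp [h1, h2] at this ⊢
        omega
      simp [h0, hb]
    · apply ih
      intro i hi hc
      have := hshift i hi hc
      simp [h1, h2] at this ⊢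
      omega

-- ===== VERDICT (by name: the statement is the Claim_ definition above) =====
theorem solve_spec : Claim_equal_solve := by
  unfold Claim_equal_solve
  intro lines _ hPre
  obtain ⟨hne, hcnt⟩ := hPre
  cases lines with
  | nil => exact absurd rfl hne
  | cons x xs =>
    unfold Spec_solve solve solve_alt
    have hget : (PySem.List.pyGet? (x :: xs) 0).getD "" = x := by
      rw [PySem.List.pyGet?_zero_cons]; rfl
    have hhead : (x :: xs).headI = x := rfl
    rw [hhead] at hcnt
    have hbal : balB (PySem.Str.strip x).toList 0 = true := by
      apply count_balB
      intro i hi hc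
      simpa using hcnt i hi hc
    have hnd0 : ((PySem.Dict.empty.insert ((0 : Int), (0 : Int)) (0 : Int)) : PVFast).keys.Nodup :=
      PySem.Dict.nodup_keys_insert _ _ _ PySem.Dict.nodup_keys_empty
    have htop := top_walk (PySem.Str.strip x).toList.length (PySem.Str.strip x).toList le_rfl hbal
      (PySem.Dict.empty.insert ((0 : Int), (0 : Int)) (0 : Int)) ((0 : Int), (0 : Int)) 0 hnd0
    have hfst := congrArg Prod.fst htop
    simp only [projA] at hfst
    simp only [hget]
    rw [hfst]
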